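-- pv_equiv track=rewrite | github.com/Lemi-in/Codeforces-daily | tempCodeRunnerFile.py | longest_subarray_sum
-- ===== SOURCE A (Python) =====
-- def longest_subarray_sum(arr):
--     max_length = 0
--     max_sum = 0
--     current_length = 1
--     current_sum = arr[0]
--
--     for i in range(1, len(arr)):
--         if arr[i] == arr[i-1] + 1:
--             current_length += 1
--             current_sum += arr[i]
--         else:
--             if current_length > max_length:
--                 max_length = current_length
--                 max_sum = current_sum
--             current_length = 1
--             current_sum = arr[i]
--
--     # Check if the last subarray is the longest
--     if current_length > max_length:
--         max_length = current_length
--         max_sum = current_sum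
--
--     return max_sum
-- ===== SOURCE B (Python) =====
-- def longest_subarray_sum(arr):
--     # Partition arr into maximal consecutive-by-one segments (length, sum, last),
--     # then pick the first longest segment with max(key=length) and return its sum.
--     segments = []
--     for x in arr:
--         if segments and x == segments[-1][2] + 1:
--             length, total, _ = segments[-1]
--             segments[-1] = (length + 1, total + x, x)
--         else:
--             segments.append((1, x, x))
--     return max(segments, key=lambda s: s[0])[1]
-- ===== Notes on version B (the rewrite author's own statement) =====
-- stated objective: alternative
-- what changed: Replaces A's inline best-so-far state machine (max_length/max_sum threaded through the loop) by a two-phase decomposition: one pass partitions the array into maximal consecutive-by-one segments with (length, sum, last), then max(segments, key=length) picks the first longest segment and its sum is returned.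
import Mathlib
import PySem

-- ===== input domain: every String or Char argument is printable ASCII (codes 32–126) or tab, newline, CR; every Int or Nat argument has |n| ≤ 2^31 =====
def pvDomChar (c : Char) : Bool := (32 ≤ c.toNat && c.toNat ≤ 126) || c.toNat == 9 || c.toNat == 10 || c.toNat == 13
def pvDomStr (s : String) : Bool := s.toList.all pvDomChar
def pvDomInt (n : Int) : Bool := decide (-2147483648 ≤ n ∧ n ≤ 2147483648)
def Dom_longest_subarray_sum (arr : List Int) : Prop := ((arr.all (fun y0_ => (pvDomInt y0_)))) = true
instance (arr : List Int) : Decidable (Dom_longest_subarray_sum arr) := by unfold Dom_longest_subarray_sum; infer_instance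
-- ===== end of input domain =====

-- B re-implements the running best-so-far loop as segment partitioning + max(key=len); same values, different decomposition (objective: alternative).

-- ===== PORT A =====
-- arr[0] raises IndexError on []; Pre_ excludes [], so the getD default 0 is never observed.
def longest_subarray_sum (arr : List Int) : Int :=
  let st := (PySem.List.pyRange 1 (PySem.List.len arr) 1).foldl
    (fun st i =>
      match st with
      | (ml, ms, cl, cs) =>
        if PySem.List.pyGetD arr i 0 = PySem.List.pyGetD arr (i - 1) 0 + 1 then
          (ml, ms, cl + 1, cs + PySem.List.pyGetD arr i 0)
        else
          if cl > ml then (cl, cs, 1, PySem.List.pyGetD arr i 0)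
          else (ml, ms, 1, PySem.List.pyGetD arr i 0))
    ((0 : Int), (0 : Int), (1 : Int), PySem.List.pyGetD arr 0 0)
  match st with
  | (ml, ms, cl, cs) => if cl > ml then cs else ms

-- ===== PORT B =====
-- the loop body of Source B: extend the last segment if x continues it, else open a new one
def segStep (segs : List (Int × Int × Int)) (x : Int) : List (Int × Int × Int) :=
  match segs.getLast? with
  | some (l, s, last) =>
    if x = last + 1 then segs.dropLast ++ [(l + 1, s + x, x)]
    else segs ++ [(1, x, x)]
  | none => segs ++ [(1, x, x)]

-- Source B's max(segments, key=len)[1]; Python max([]) raises ValueError on [],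
-- Pre_ excludes [], so the `none` default 0 is never observed.
def extractB (segs : List (Int × Int × Int)) : Int :=
  match PySem.List.max? segs (fun s => s.1) with
  | some s => s.2.1
  | none => 0

def longest_subarray_sum_alt (arr : List Int) : Int :=
  extractB (arr.foldl segStep [])

-- ===== PRECONDITION & SPEC =====
-- Pre_ excludes only the empty list, on which A raises IndexError (and B raises ValueError).
def Pre_longest_subarray_sum (arr : List Int) : Prop := arr ≠ []
instance (arr : List Int) : Decidable (Pre_longest_subarray_sum arr) := by
  unfold Pre_longest_subarray_sum; infer_instance

def pvWitness_longest_subarray_sum : List Int := ([1, 2, 5])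

def Spec_longest_subarray_sum (arr : List Int) (out : Int) : Prop := out = longest_subarray_sum_alt arr
instance (arr : List Int) (out : Int) : Decidable (Spec_longest_subarray_sum arr out) := by unfold Spec_longest_subarray_sum; infer_instance

-- ===== CLAIM (what is proved, stated in full; the proofs are below) =====
def Claim_equal_longest_subarray_sum : Prop := ∀ (arr : List Int), Dom_longest_subarray_sum arr → Pre_longest_subarray_sum arr → Spec_longest_subarray_sum arr (longest_subarray_sum arr)

-- ===== LEMMAS AND PROOFS =====

-- A's loop body, abstracted over the (previous, current) pair it reads from arr.
def stepA (st : Int × Int × Int × Int) (pc : Int × Int) : Int × Int × Int × Int :=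
  match st, pc with
  | (ml, ms, cl, cs), (p, c) =>
    if c = p + 1 then (ml, ms, cl + 1, cs + c)
    else if cl > ml then (cl, cs, 1, c) else (ml, ms, 1, c)

def finishA (st : Int × Int × Int × Int) : Int :=
  match st with
  | (ml, ms, cl, cs) => if cl > ml then cs else ms

-- (max_length, max_sum) summary of a list of completed segments, as A maintains it.
def bestLS (done : List (Int × Int × Int)) : Int × Int :=
  done.foldl (fun b s => if s.1 > b.1 then (s.1, s.2.1) else b) (0, 0)

-- first-maximal running fold
def maxFold (b : Int × Int × Int) (rest : List (Int × Int × Int)) : Int × Int × Int :=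
  rest.foldl (fun m x => if m.1 < x.1 then x else m) b

theorem max?_eq_maxFold (b : Int × Int × Int) (rest : List (Int × Int × Int)) :
    PySem.List.max? (b :: rest) (fun s => s.1) = some (maxFold b rest) := by
  show List.foldl _ (some b) rest = _
  induction rest generalizing b with
  | nil => rfl
  | cons x t ih =>
    show List.foldl _ (if b.1 < x.1 then some x else some b) t
        = some (List.foldl (fun m y => if m.1 < y.1 then y else m) (if b.1 < x.1 then x else b) t)
    by_cases h : b.1 < x.1
    · simp only [if_pos h]; exact ih x
    · simp only [if_neg h]; exact ih b

theorem bestLS_aux (rest : List (Int × Int × Int)) (b : Int × Int × Int) :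
    rest.foldl (fun p s => if p.1 < s.1 then (s.1, s.2.1) else p) ((b.1, b.2.1) : Int × Int)
      = ((maxFold b rest).1, (maxFold b rest).2.1) := by
  induction rest generalizing b with
  | nil => rfl
  | cons x t ih =>
    show List.foldl _ (if b.1 < x.1 then (x.1, x.2.1) else (b.1, b.2.1)) t
        = ((List.foldl (fun m y => if m.1 < y.1 then y else m) (if b.1 < x.1 then x else b) t).1,
           (List.foldl (fun m y => if m.1 < y.1 then y else m) (if b.1 < x.1 then x else b) t).2.1)
    by_cases h : b.1 < x.1
    · simp only [if_pos h]; exact ih x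
    · simp only [if_neg h]; exact ih b

theorem bestLS_cons_eq (b : Int × Int × Int) (rest : List (Int × Int × Int)) (hb : 1 ≤ b.1) :
    bestLS (b :: rest) = ((maxFold b rest).1, (maxFold b rest).2.1) := by
  have h1 : bestLS (b :: rest)
      = rest.foldl (fun p s => if p.1 < s.1 then (s.1, s.2.1) else p) ((b.1, b.2.1) : Int × Int) := by
    simp only [bestLS, List.foldl_cons, gt_iff_lt, if_pos (show (0:Int) < b.1 by omega)]
  rw [h1, bestLS_aux]

theorem extractB_concat (done : List (Int × Int × Int)) (cur : Int × Int × Int)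
    (hd : ∀ s ∈ done, 1 ≤ s.1) (hc : 1 ≤ cur.1) :
    extractB (done ++ [cur]) =
      (if cur.1 > (bestLS done).1 then cur.2.1 else (bestLS done).2) := by
  cases done with
  | nil =>
    simp only [List.nil_append, extractB, max?_eq_maxFold, maxFold, List.foldl_nil, bestLS]
    rw [if_pos (by omega : cur.1 > (0:Int))]
  | cons b rest =>
    have hb : 1 ≤ b.1 := hd b (List.mem_cons_self ..)
    rw [show (b :: rest) ++ [cur] = b :: (rest ++ [cur]) from rfl]
    simp only [extractB, max?_eq_maxFold, bestLS_cons_eq b rest hb]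
    have hstep : maxFold b (rest ++ [cur])
        = (if (maxFold b rest).1 < cur.1 then cur else maxFold b rest) := by
      simp [maxFold, List.foldl_append]
    rw [hstep]
    by_cases h : (maxFold b rest).1 < cur.1
    · rw [if_pos h, if_pos (show cur.1 > (maxFold b rest).1 from h)]
    · rw [if_neg h, if_neg (show ¬ cur.1 > (maxFold b rest).1 from h)]

-- Main loop correspondence: A's pairwise fold agrees with B's segment fold.
theorem loop_corr (t : List Int) (done : List (Int × Int × Int)) (cl cs last : Int)
    (hcl : 1 ≤ cl) (hd : ∀ s ∈ done, 1 ≤ s.1) :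
    finishA (((last :: t).zip t).foldl stepA ((bestLS done).1, (bestLS done).2, cl, cs)) =
      extractB (t.foldl segStep (done ++ [(cl, cs, last)])) := by
  induction t generalizing done cl cs last with
  | nil =>
    simp only [List.zip_nil_right, List.foldl_nil, finishA]
    rw [extractB_concat done (cl, cs, last) hd hcl]
  | cons x rest ih =>
    have hz : (last :: x :: rest).zip (x :: rest) = (last, x) :: ((x :: rest).zip rest) := rfl
    rw [hz, List.foldl_cons, List.foldl_cons]
    have hseg : segStep (done ++ [(cl, cs, last)]) x =
        if x = last + 1 then done ++ [(cl + 1, cs + x, x)]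
        else (done ++ [(cl, cs, last)]) ++ [(1, x, x)] := by
      simp only [segStep, List.getLast?_concat]
      by_cases h : x = last + 1
      · simp [h]
      · simp [h]
    by_cases h : x = last + 1
    · rw [hseg, if_pos h]
      have : stepA ((bestLS done).1, (bestLS done).2, cl, cs) (last, x) =
          ((bestLS done).1, (bestLS done).2, cl + 1, cs + x) := by
        simp [stepA, h]
      rw [this]
      exact ih done (cl + 1) (cs + x) x (by omega) hd
    · rw [hseg, if_neg h]
      have hstep : stepA ((bestLS done).1, (bestLS done).2, cl, cs) (last, x) =
          ((bestLS (done ++ [(cl, cs, last)])).1, (bestLS (done ++ [(cl, cs, last)])).2, 1, x) := by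
        have : bestLS (done ++ [(cl, cs, last)]) =
            (if cl > (bestLS done).1 then (cl, cs) else bestLS done) := by
          simp [bestLS, List.foldl_append]
        rw [this]
        simp only [stepA, if_neg h]
        by_cases h2 : cl > (bestLS done).1 <;> simp [h2]
      rw [hstep]
      refine (ih (done ++ [(cl, cs, last)]) 1 x x (le_refl 1) ?_)
      intro s hs
      rcases List.mem_append.mp hs with h1 | h1
      · exact hd s h1
      · simp at h1; subst h1; exact hcl

-- Reshape A's index fold into a fold over adjacent pairs.
theorem pyRange_map_pairs (a : Int) (t : List Int) :
    (PySem.List.pyRange 1 (PySem.List.len (a :: t)) 1).map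
      (fun i => (PySem.List.pyGetD (a :: t) (i - 1) 0, PySem.List.pyGetD (a :: t) i 0)) =
      (a :: t).zip t := by
  have hlen : (PySem.List.pyRange 1 (PySem.List.len (a :: t)) 1).length = t.length := by
    rw [PySem.List.length_pyRange_one]
    simp [PySem.List.len]
  apply List.ext_getElem
  · simp
  · intro k h1 h2
    have hk : k < t.length := by simpa [hlen] using h1
    have hk' : k < (PySem.List.pyRange 1 (PySem.List.len (a :: t)) 1).length := by omega
    have hr : (PySem.List.pyRange 1 (PySem.List.len (a :: t)) 1)[k] = 1 + (k : Int) :=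
      PySem.List.getElem_pyRange_one _ _ k hk'
    simp only [List.getElem_map, hr]
    have e1 : (1 : Int) + (k : Int) - 1 = ((k : Nat) : Int) := by ring
    have e2 : (1 : Int) + (k : Int) = (((k + 1 : Nat)) : Int) := by push_cast; ring
    rw [e1, e2, PySem.List.pyGetD_natCast, PySem.List.pyGetD_natCast]
    have hk1 : k < (a :: t).length := by simp; omega
    have hk2 : k + 1 < (a :: t).length := by simp; omega
    rw [List.getD_eq_getElem _ _ hk1, List.getD_eq_getElem _ _ hk2]
    simp [List.getElem_zip]

-- ===== VERDICT (by name: the statement is the Claim_ definition above) =====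
theorem longest_subarray_sum_spec : Claim_equal_longest_subarray_sum := by
  intro arr _ hpre
  unfold Spec_longest_subarray_sum
  cases arr with
  | nil => exact absurd rfl hpre
  | cons a t =>
    show finishA _ = _
    have hbody : (fun (st : Int × Int × Int × Int) (i : Int) =>
        match st with
        | (ml, ms, cl, cs) =>
          if PySem.List.pyGetD (a :: t) i 0 = PySem.List.pyGetD (a :: t) (i - 1) 0 + 1 then
            (ml, ms, cl + 1, cs + PySem.List.pyGetD (a :: t) i 0)
          else
            if cl > ml then (cl, cs, 1, PySem.List.pyGetD (a :: t) i 0)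
            else (ml, ms, 1, PySem.List.pyGetD (a :: t) i 0)) =
        (fun st i => stepA st
          ((fun i => (PySem.List.pyGetD (a :: t) (i - 1) 0, PySem.List.pyGetD (a :: t) i 0)) i)) := by
      funext st i
      rcases st with ⟨ml, ms, cl, cs⟩
      simp [stepA]
    have h0 : PySem.List.pyGetD (a :: t) 0 0 = a := by
      rw [show (0 : Int) = ((0 : Nat) : Int) from rfl, PySem.List.pyGetD_natCast]; rfl
    rw [hbody, ← List.foldl_map, pyRange_map_pairs, h0]
    have h := loop_corr t [] 1 a a (le_refl 1) (by intro s hs; simp at hs)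
    simp only [bestLS, List.foldl_nil, List.nil_append] at h
    rw [show longest_subarray_sum_alt (a :: t) = extractB (t.foldl segStep [(1, a, a)]) from rfl]
    exact h
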